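-- pv_equiv track=rewrite | github.com/singo112ok/algorithm | programmers/level2/trans_parentheses.py | right
-- ===== SOURCE A (Python) =====
-- def right(p):
--     nLCnt = 0
--     nRCnt = 0
--     for i in range(0, len(p)):
--         if p[i] == '(':
--             nLCnt += 1
--         else:
--             nRCnt += 1
--         if nLCnt < nRCnt:
--             return -1
--     else:
--         return 0
-- ===== SOURCE B (Python) =====
-- def right(p):
--     prefix = []
--     s = 0
--     for c in p:
--         s += 1 if c == '(' else -1
--         prefix.append(s)
--     return -1 if prefix and min(prefix) < 0 else 0
-- ===== Notes on version B (the rewrite author's own statement) =====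
-- stated objective: alternative
-- what changed: A keeps two running counters and early-returns -1 as soon as close-parens lead; B materializes the full +1/-1 prefix-sum table in one pass and then decides with a separate min() scan over it.
import Mathlib
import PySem

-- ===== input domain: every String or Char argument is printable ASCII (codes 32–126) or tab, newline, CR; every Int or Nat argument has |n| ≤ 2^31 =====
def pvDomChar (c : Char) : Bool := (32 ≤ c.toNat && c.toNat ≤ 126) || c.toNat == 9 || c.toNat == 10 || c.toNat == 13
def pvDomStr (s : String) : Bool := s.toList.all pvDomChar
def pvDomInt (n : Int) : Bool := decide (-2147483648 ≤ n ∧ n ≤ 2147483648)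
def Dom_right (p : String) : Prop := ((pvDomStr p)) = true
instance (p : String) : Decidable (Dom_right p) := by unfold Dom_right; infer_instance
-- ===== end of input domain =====

-- B replaces A's two running counters with early exit by building the full ±1 prefix-sum
-- table in one pass and deciding with a separate min() scan over it (alternative decomposition).

-- ===== PORT A =====
-- A's for-loop with the two counters and the early 'return -1'
def rightLoop (cs : List Char) (nLCnt nRCnt : Int) : Int :=
  match cs with
  | [] => 0
  | c :: rest =>
    let nL := if c = '(' then nLCnt + 1 else nLCnt
    let nR := if c = '(' then nRCnt else nRCnt + 1
    if nL < nR then -1 else rightLoop rest nL nR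

def right (p : String) : Int := rightLoop p.toList 0 0

-- ===== PORT B =====
def right_alt (p : String) : Int :=
  -- phase 1: build the prefix-sum table (prefix.append(s) for each char)
  let pre :=
    (p.toList.foldl
      (fun (acc : List Int × Int) c =>
        let s := acc.2 + (if c = '(' then 1 else -1)
        (acc.1 ++ [s], s))
      ([], 0)).1
  -- phase 2: '-1 if prefix and min(prefix) < 0 else 0'
  match PySem.List.min? pre (fun x => x) with
  | none => 0
  | some m => if m < 0 then -1 else 0

-- ===== PRECONDITION & SPEC =====
def Spec_right (p : String) (out : Int) : Prop := out = right_alt p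
instance (p : String) (out : Int) : Decidable (Spec_right p out) := by unfold Spec_right; infer_instance

-- ===== CLAIM (what is proved, stated in full; the proofs are below) =====
def Claim_equal_right : Prop := ∀ (p : String), Dom_right p → Spec_right p (right p)

-- ===== LEMMAS AND PROOFS =====

-- the prefix sums of the ±1 values of cs starting from d
def scanFrom (d : Int) : List Char → List Int
  | [] => []
  | c :: r =>
    let d' := d + (if c = '(' then 1 else -1)
    d' :: scanFrom d' r

theorem foldl_prefix (cs : List Char) :
    ∀ (pre : List Int) (s : Int),
      (cs.foldl
        (fun (acc : List Int × Int) c =>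
          let v := acc.2 + (if c = '(' then 1 else -1)
          (acc.1 ++ [v], v))
        (pre, s)).1 = pre ++ scanFrom s cs := by
  induction cs with
  | nil => intro pre s; simp [scanFrom]
  | cons c r ih =>
      intro pre s
      simp only [List.foldl, scanFrom]
      rw [ih]
      simp

theorem rightLoop_char (cs : List Char) :
    ∀ (nL nR : Int),
      rightLoop cs nL nR =
        if (scanFrom (nL - nR) cs).any (fun x => decide (x < 0)) then -1 else 0 := by
  induction cs with
  | nil => intro nL nR; simp [rightLoop, scanFrom]
  | cons c r ih =>
      intro nL nR
      by_cases hc : c = '('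
      · simp only [rightLoop, scanFrom, List.any_cons, if_pos hc]
        by_cases h : nL + 1 < nR
        · have h0 : nL - nR + 1 < 0 := by omega
          simp [h, h0]
        · have h0 : ¬ (nL - nR + 1 < 0) := by omega
          rw [if_neg h, ih]
          have he : nL + 1 - nR = nL - nR + 1 := by ring
          rw [he]
          simp [h0]
      · simp only [rightLoop, scanFrom, List.any_cons, if_neg hc]
        by_cases h : nL < nR + 1
        · have h0 : nL - nR + -1 < 0 := by omega
          simp [h, h0]
        · have h0 : ¬ (nL - nR + -1 < 0) := by omega
          rw [if_neg h, ih]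
          have he : nL - (nR + 1) = nL - nR + -1 := by ring
          rw [he]
          simp [h0]

theorem right_alt_char (p : String) :
    right_alt p = if (scanFrom 0 p.toList).any (fun x => decide (x < 0)) then -1 else 0 := by
  unfold right_alt
  rw [foldl_prefix p.toList [] 0]
  simp only [List.nil_append]
  rcases hm : PySem.List.min? (scanFrom 0 p.toList) (fun x => x) with _ | m
  · have : scanFrom 0 p.toList = [] := (PySem.List.min?_eq_none_iff _ _).mp hm
    simp [this]
  · have hmem : m ∈ scanFrom 0 p.toList := PySem.List.min?_mem hm
    have hmin := PySem.List.min?_isMin hm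
    by_cases hneg : m < 0
    · have : (scanFrom 0 p.toList).any (fun x => decide (x < 0)) = true := by
        exact List.any_eq_true.mpr ⟨m, hmem, by simpa using hneg⟩
      simp [this, hneg]
    · have : (scanFrom 0 p.toList).any (fun x => decide (x < 0)) = false := by
        rw [List.any_eq_false]
        intro x hx
        have := hmin x hx
        simp only [decide_eq_true_eq]
        omega
      simp [this, hneg]

theorem right_spec : Claim_equal_right := by
  intro p _
  unfold Spec_right right
  rw [right_alt_char, rightLoop_char]
  norm_num
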